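-- pv_equiv track=rewrite | github.com/mucego/vanbit | van.py | tem_sequencia_linear
-- ===== SOURCE A (Python) =====
-- HEX = "0123456789abcdef"
--
-- def tem_sequencia_linear(s, tam=3):
--     for i in range(len(s) - tam + 1):
--         idx = [HEX.find(c) for c in s[i:i+tam]]
--         if -1 in idx:
--             continue
--         if all(idx[j] + 1 == idx[j+1] for j in range(len(idx)-1)):
--             return True
--         if all(idx[j] - 1 == idx[j+1] for j in range(len(idx)-1)):
--             return True
--     return False
-- ===== SOURCE B (Python) =====
-- HEX = "0123456789abcdef"
--
-- def tem_sequencia_linear(s, tam=3):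
--     # single pass: track lengths of the current ascending and descending
--     # consecutive-hex-digit runs ending at the current character
--     if tam <= 0:
--         return True  # an empty (length <= 0) run exists in any string
--     asc = desc = 0
--     prev = None
--     for c in s:
--         d = HEX.find(c)
--         if d < 0:
--             asc = desc = 0
--             prev = None
--         else:
--             asc = asc + 1 if prev is not None and d == prev + 1 else 1
--             desc = desc + 1 if prev is not None and d == prev - 1 else 1
--             prev = d
--             if asc >= tam or desc >= tam:
--                 return True
--     return False
-- ===== Notes on version B (the rewrite author's own statement) =====
-- stated objective: faster
-- what changed: A rescans every length-tam window (building a slice and index list per start position); B makes a single pass over the string maintaining the lengths of the current ascending and descending consecutive-hex-digit runs.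
import Mathlib
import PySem

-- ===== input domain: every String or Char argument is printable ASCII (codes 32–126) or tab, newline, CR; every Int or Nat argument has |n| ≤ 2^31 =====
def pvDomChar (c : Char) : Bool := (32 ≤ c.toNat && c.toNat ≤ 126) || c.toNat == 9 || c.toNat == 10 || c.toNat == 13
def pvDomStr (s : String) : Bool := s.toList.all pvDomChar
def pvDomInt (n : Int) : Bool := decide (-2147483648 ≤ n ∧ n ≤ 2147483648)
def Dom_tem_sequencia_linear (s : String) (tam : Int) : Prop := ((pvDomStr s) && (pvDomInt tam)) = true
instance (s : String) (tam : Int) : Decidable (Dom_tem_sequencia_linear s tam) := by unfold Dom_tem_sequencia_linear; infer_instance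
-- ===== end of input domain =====

-- B replaces A's slice-per-window rescan by a single pass that tracks the lengths of the
-- current ascending and descending consecutive-hex-digit runs (objective: faster).

-- HEX = "0123456789abcdef";  HEX.find(c)  (shared primitive of both Pythons)
def pvHexFind (c : Char) : Int := PySem.Chars.find "0123456789abcdef".toList [c]

-- ===== PORT A =====
-- idx = [HEX.find(c) for c in s[i:i+tam]]
def pvIdx (l : List Char) (tam : Int) (i : Int) : List Int :=
  (PySem.List.slice l (some i) (some (i + tam))).map pvHexFind

-- all(idx[j] + 1 == idx[j+1] for j in range(len(idx)-1))
def pvAllUp (idx : List Int) : Bool :=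
  (PySem.List.pyRange 0 ((idx.length : Int) - 1) 1).all
    (fun j => PySem.List.pyGetD idx j 0 + 1 == PySem.List.pyGetD idx (j + 1) 0)

-- all(idx[j] - 1 == idx[j+1] for j in range(len(idx)-1))
def pvAllDown (idx : List Int) : Bool :=
  (PySem.List.pyRange 0 ((idx.length : Int) - 1) 1).all
    (fun j => PySem.List.pyGetD idx j 0 - 1 == PySem.List.pyGetD idx (j + 1) 0)

-- the for-loop over range(len(s) - tam + 1): iterate i from 0 while i < len(s) - tam + 1
def pvLoopA (l : List Char) (tam : Int) (i stop : Int) : Bool :=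
  if _h : i < stop then
    let idx := pvIdx l tam i
    if (-1 : Int) ∈ idx then pvLoopA l tam (i + 1) stop
    else if pvAllUp idx then true
    else if pvAllDown idx then true
    else pvLoopA l tam (i + 1) stop
  else false
termination_by (stop - i).toNat
decreasing_by all_goals omega

def tem_sequencia_linear (s : String) (tam : Int) : Bool :=
  pvLoopA s.toList tam 0 ((s.toList.length : Int) - tam + 1)

-- ===== PORT B =====
def pvLoopB (tam : Int) : List Char → Int → Int → Option Int → Bool
  | [], _, _, _ => false
  | c :: r, asc, desc, prev =>
    let d := pvHexFind c
    if d < 0 then pvLoopB tam r 0 0 none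
    else
      let asc' := match prev with
        | some p => if d == p + 1 then asc + 1 else 1
        | none => 1
      let desc' := match prev with
        | some p => if d == p - 1 then desc + 1 else 1
        | none => 1
      if asc' ≥ tam || desc' ≥ tam then true
      else pvLoopB tam r asc' desc' (some d)


def tem_sequencia_linear_alt (s : String) (tam : Int) : Bool :=
  if tam ≤ 0 then true
  else pvLoopB tam s.toList 0 0 none

-- ===== PRECONDITION & SPEC =====
def Spec_tem_sequencia_linear (s : String) (tam : Int) (out : Bool) : Prop := out = tem_sequencia_linear_alt s tam
instance (s : String) (tam : Int) (out : Bool) : Decidable (Spec_tem_sequencia_linear s tam out) := by unfold Spec_tem_sequencia_linear; infer_instance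

-- ===== CLAIM (what is proved, stated in full; the proofs are below) =====
def Claim_equal_tem_sequencia_linear : Prop := ∀ (s : String) (tam : Int), Dom_tem_sequencia_linear s tam → Spec_tem_sequencia_linear s tam (tem_sequencia_linear s tam)

-- ===== LEMMAS AND PROOFS =====

def pvChW (st : Int) : List Char → Bool
  | [] => true
  | [c] => decide (0 ≤ pvHexFind c)
  | a :: b :: r => decide (0 ≤ pvHexFind a) && decide (pvHexFind a + st = pvHexFind b) && pvChW st (b :: r)

theorem pvChW_elem_hex (st : Int) : ∀ (w : List Char), pvChW st w = true → ∀ c ∈ w, 0 ≤ pvHexFind c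
  | [] => by simp
  | [a] => by simp [pvChW]
  | a :: b :: r => by
    intro hw c hc
    simp only [pvChW, Bool.and_eq_true, decide_eq_true_eq] at hw
    rcases List.mem_cons.mp hc with rfl | hc'
    · exact hw.1.1
    · exact pvChW_elem_hex st (b :: r) hw.2 c hc'

theorem pvChW_snoc (st : Int) : ∀ (w : List Char) (c : Char),
    pvChW st (w ++ [c]) = true ↔
      pvChW st w = true ∧ 0 ≤ pvHexFind c ∧
      (∀ x, w.getLast? = some x → pvHexFind x + st = pvHexFind c)
  | [], c => by simp [pvChW]
  | [a], c => by
    simp [pvChW]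
    tauto
  | a :: b :: r, c => by
    have ih := pvChW_snoc st (b :: r) c
    simp only [List.cons_append] at ih ⊢
    simp only [pvChW, Bool.and_eq_true, decide_eq_true_eq, List.getLast?_cons_cons] at ih ⊢
    rw [ih]
    tauto

theorem pvChW_iff_getElem (st : Int) : ∀ (w : List Char),
    pvChW st w = true ↔
      (∀ j (h : j < w.length), 0 ≤ pvHexFind w[j]) ∧
      (∀ j (h : j + 1 < w.length), pvHexFind w[j] + st = pvHexFind w[j + 1])
  | [] => by simp [pvChW]
  | [a] => by simp [pvChW]
  | a :: b :: r => by
    have ih := pvChW_iff_getElem st (b :: r)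
    simp only [pvChW, Bool.and_eq_true, decide_eq_true_eq, ih]
    constructor
    · rintro ⟨⟨h1, h2⟩, h3, h4⟩
      refine ⟨?_, ?_⟩
      · intro j hj
        match j with
        | 0 => exact h1
        | j + 1 => exact h3 j (by simpa using hj)
      · intro j hj
        match j with
        | 0 => simpa using h2
        | j + 1 => exact h4 j (by simpa using hj)
    · rintro ⟨h1, h2⟩
      refine ⟨⟨h1 0 (by simp), by simpa using h2 0 (by simp)⟩, ?_, ?_⟩
      · intro j hj; exact h1 (j + 1) (by simpa using hj)
      · intro j hj; exact h2 (j + 1) (by simpa using hj)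

def pvSpecRun (T : Nat) (l : List Char) : Prop :=
  ∃ w : List Char, w.length = T ∧ w <:+: l ∧ (pvChW 1 w = true ∨ pvChW (-1) w = true)

theorem pvInfix_snoc (w l : List Char) (c : Char) :
    w <:+: l ++ [c] ↔ w <:+: l ∨ w <:+ l ++ [c] := by
  constructor
  · intro h
    have h' : w.reverse <:+: c :: l.reverse := by
      rw [← List.reverse_infix] at h; simpa using h
    rcases List.infix_cons_iff.mp h' with hp | hi
    · right
      rw [← List.reverse_prefix]
      simpa using hp
    · left
      rw [← List.reverse_infix]
      simpa using hi
  · rintro (h | h)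
    · exact h.trans ⟨[], [c], by simp⟩
    · exact h.isInfix

theorem pvSpecRun_snoc (T : Nat) (l : List Char) (c : Char) :
    pvSpecRun T (l ++ [c]) ↔ pvSpecRun T l ∨
      (∃ w, w <:+ l ++ [c] ∧ w.length = T ∧ (pvChW 1 w = true ∨ pvChW (-1) w = true)) := by
  constructor
  · rintro ⟨w, hl, hin, hch⟩
    rcases (pvInfix_snoc w l c).mp hin with h | h
    · exact Or.inl ⟨w, hl, h, hch⟩
    · exact Or.inr ⟨w, h, hl, hch⟩
  · rintro (⟨w, hl, hin, hch⟩ | ⟨w, hs, hl, hch⟩)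
    · exact ⟨w, hl, hin.trans ⟨[], [c], by simp⟩, hch⟩
    · exact ⟨w, hl, hs.isInfix, hch⟩

theorem pvSuffix_getLast? (w l : List Char) (h : w <:+ l) (hw : w ≠ []) :
    w.getLast? = l.getLast? := by
  obtain ⟨u, rfl⟩ := h
  exact (List.getLast?_append_of_ne_nil u hw).symm

def pvCondA (l : List Char) (tam : Int) (i : Int) : Prop :=
  (-1 : Int) ∉ pvIdx l tam i ∧ (pvAllUp (pvIdx l tam i) = true ∨ pvAllDown (pvIdx l tam i) = true)

theorem pvLoopA_any_aux (l : List Char) (tam : Int) (stop : Int) : ∀ (n : Nat) (i : Int),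
    (stop - i).toNat = n →
    (pvLoopA l tam i stop = true ↔ ∃ j ∈ PySem.List.pyRange i stop 1, pvCondA l tam j) := by
  intro n
  induction n with
  | zero =>
    intro i hn
    rw [pvLoopA, dif_neg (by omega), PySem.List.pyRange_one_eq_nil (by omega)]
    simp
  | succ n ihn =>
    intro i hn
    have h : i < stop := by omega
    have ih := ihn (i + 1) (by omega)
    rw [pvLoopA, dif_pos h, PySem.List.pyRange_one_cons h]
    simp only [List.mem_cons, exists_eq_or_imp]
    by_cases h1 : (-1 : Int) ∈ pvIdx l tam i
    · rw [if_pos h1, ih]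
      have hni : ¬ pvCondA l tam i := by intro hc; exact hc.1 h1
      exact ⟨fun h => Or.inr h, fun h => h.resolve_left hni⟩
    · rw [if_neg h1]
      by_cases h2 : pvAllUp (pvIdx l tam i) = true
      · rw [if_pos h2]
        exact iff_of_true rfl (Or.inl ⟨h1, Or.inl h2⟩)
      · rw [if_neg h2]
        by_cases h3 : pvAllDown (pvIdx l tam i) = true
        · rw [if_pos h3]
          exact iff_of_true rfl (Or.inl ⟨h1, Or.inr h3⟩)
        · rw [if_neg h3, ih]
          have hni : ¬ pvCondA l tam i := by rintro ⟨_, hc | hc⟩; exact h2 hc; exact h3 hc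
          exact ⟨fun h => Or.inr h, fun h => h.resolve_left hni⟩

theorem pvLoopA_any (l : List Char) (tam : Int) (i stop : Int) :
    pvLoopA l tam i stop = true ↔ ∃ j ∈ PySem.List.pyRange i stop 1, pvCondA l tam j :=
  pvLoopA_any_aux l tam stop (stop - i).toNat i rfl

theorem pvAllUp_iff (idx : List Int) :
    pvAllUp idx = true ↔ ∀ (j : Nat) (h : j + 1 < idx.length), idx[j] + 1 = idx[j + 1] := by
  unfold pvAllUp
  rw [List.all_eq_true]
  constructor
  · intro h j hj
    have hm : (j : Int) ∈ PySem.List.pyRange 0 ((idx.length : Int) - 1) 1 :=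
      PySem.List.mem_pyRange_one.mpr ⟨by positivity, by omega⟩
    have h2 := h _ hm
    rw [show (j : Int) + 1 = ((j + 1 : Nat) : Int) by push_cast; ring] at h2
    rw [PySem.List.pyGetD_natCast, PySem.List.pyGetD_natCast] at h2
    rw [List.getD_eq_getElem _ _ (by omega), List.getD_eq_getElem _ _ (by omega)] at h2
    exact beq_iff_eq.mp h2
  · intro h x hx
    obtain ⟨hx0, hx1⟩ := PySem.List.mem_pyRange_one.mp hx
    have hxx : x = ((x.toNat : Nat) : Int) := by omega
    rw [hxx, show ((x.toNat : Nat) : Int) + 1 = ((x.toNat + 1 : Nat) : Int) by push_cast; ring]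
    rw [PySem.List.pyGetD_natCast, PySem.List.pyGetD_natCast]
    rw [List.getD_eq_getElem _ _ (by omega), List.getD_eq_getElem _ _ (by omega)]
    exact beq_iff_eq.mpr (h x.toNat (by omega))

theorem pvAllDown_iff (idx : List Int) :
    pvAllDown idx = true ↔ ∀ (j : Nat) (h : j + 1 < idx.length), idx[j] - 1 = idx[j + 1] := by
  unfold pvAllDown
  rw [List.all_eq_true]
  constructor
  · intro h j hj
    have hm : (j : Int) ∈ PySem.List.pyRange 0 ((idx.length : Int) - 1) 1 :=
      PySem.List.mem_pyRange_one.mpr ⟨by positivity, by omega⟩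
    have h2 := h _ hm
    rw [show (j : Int) + 1 = ((j + 1 : Nat) : Int) by push_cast; ring] at h2
    rw [PySem.List.pyGetD_natCast, PySem.List.pyGetD_natCast] at h2
    rw [List.getD_eq_getElem _ _ (by omega), List.getD_eq_getElem _ _ (by omega)] at h2
    exact beq_iff_eq.mp h2
  · intro h x hx
    obtain ⟨hx0, hx1⟩ := PySem.List.mem_pyRange_one.mp hx
    have hxx : x = ((x.toNat : Nat) : Int) := by omega
    rw [hxx, show ((x.toNat : Nat) : Int) + 1 = ((x.toNat + 1 : Nat) : Int) by push_cast; ring]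
    rw [PySem.List.pyGetD_natCast, PySem.List.pyGetD_natCast]
    rw [List.getD_eq_getElem _ _ (by omega), List.getD_eq_getElem _ _ (by omega)]
    exact beq_iff_eq.mpr (h x.toNat (by omega))

theorem pvF_ge (c : Char) : -1 ≤ pvHexFind c :=
  PySem.Chars.neg_one_le_find "0123456789abcdef".toList [c]

theorem pvWindowLen (l : List Char) (tam : Int) (i : Int) (ht : 1 ≤ tam) (hi : 0 ≤ i)
    (_hin : i + tam ≤ (l.length : Int)) : ((l.drop i.toNat).take tam.toNat).length = tam.toNat := by
  simp only [List.length_take, List.length_drop]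
  omega

theorem pvIdx_eq (l : List Char) (tam : Int) (i : Int) (hi : 0 ≤ i) (hb : 0 ≤ i + tam) :
    pvIdx l tam i = ((l.drop i.toNat).take ((i + tam).toNat - i.toNat)).map pvHexFind := by
  unfold pvIdx
  rw [PySem.List.slice_toNat _ hi hb]

theorem pvCondA_iff (l : List Char) (tam : Int) (ht : 1 ≤ tam) (i : Int) (hi : 0 ≤ i)
    (_hin : i + tam ≤ (l.length : Int)) :
    pvCondA l tam i ↔
      (pvChW 1 ((l.drop i.toNat).take tam.toNat) = true ∨
       pvChW (-1) ((l.drop i.toNat).take tam.toNat) = true) := by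
  have hw : pvIdx l tam i = ((l.drop i.toNat).take tam.toNat).map pvHexFind := by
    rw [pvIdx_eq l tam i hi (by omega), show (i + tam).toNat - i.toNat = tam.toNat by omega]
  unfold pvCondA
  rw [hw, pvAllUp_iff, pvAllDown_iff, pvChW_iff_getElem, pvChW_iff_getElem]
  have hbr : ((-1 : Int) ∉ ((l.drop i.toNat).take tam.toNat).map pvHexFind) ↔
      (∀ j (h : j < ((l.drop i.toNat).take tam.toNat).length),
        0 ≤ pvHexFind ((l.drop i.toNat).take tam.toNat)[j]) := by
    simp only [List.mem_map, not_exists, not_and]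
    constructor
    · intro h j hj
      have h1 := h ((l.drop i.toNat).take tam.toNat)[j] (List.getElem_mem _)
      have h2 := pvF_ge ((l.drop i.toNat).take tam.toNat)[j]
      omega
    · intro h c hc
      obtain ⟨j, hj, rfl⟩ := List.mem_iff_getElem.mp hc
      have := h j hj
      omega
  simp only [List.length_map, List.getElem_map]
  rw [hbr]
  constructor
  · rintro ⟨hhex, hup | hdn⟩
    · exact Or.inl ⟨hhex, fun j hj => hup j hj⟩
    · exact Or.inr ⟨hhex, fun j hj => by have := hdn j hj; omega⟩
  · rintro (⟨hhex, hadj⟩ | ⟨hhex, hadj⟩)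
    · exact ⟨hhex, Or.inl fun j hj => hadj j hj⟩
    · exact ⟨hhex, Or.inr fun j hj => by have := hadj j hj; omega⟩

theorem pvA_iff (l : List Char) (tam : Int) (ht : 1 ≤ tam) :
    pvLoopA l tam 0 ((l.length : Int) - tam + 1) = true ↔
      pvSpecRun tam.toNat l := by
  rw [pvLoopA_any]
  constructor
  · rintro ⟨i, hmem, hcond⟩
    obtain ⟨h0, h1⟩ := PySem.List.mem_pyRange_one.mp hmem
    have hin : i + tam ≤ (l.length : Int) := by omega
    have hch := (pvCondA_iff l tam ht i h0 hin).mp hcond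
    refine ⟨(l.drop i.toNat).take tam.toNat, pvWindowLen l tam i ht h0 hin, ?_, hch⟩
    exact (List.take_prefix _ _).isInfix.trans (List.drop_suffix _ _).isInfix
  · rintro ⟨w, hlen, hinf, hch⟩
    obtain ⟨u, v, huv⟩ := hinf
    have hl := congrArg List.length huv
    simp only [List.length_append] at hl
    refine ⟨(u.length : Int), ?_, ?_⟩
    · exact PySem.List.mem_pyRange_one.mpr ⟨by positivity, by omega⟩
    · rw [pvCondA_iff l tam ht _ (by positivity) (by omega)]
      have hwin : (l.drop ((u.length : Int)).toNat).take tam.toNat = w := by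
        rw [Int.toNat_natCast, ← huv, List.append_assoc, List.drop_left,
          show tam.toNat = w.length by omega, List.take_left]
      rw [hwin]
      exact hch

theorem pvA_neg (l : List Char) (tam : Int) (ht : tam ≤ 0) :
    pvLoopA l tam 0 ((l.length : Int) - tam + 1) = true := by
  rw [pvLoopA_any]
  refine ⟨(l.length : Int) - tam, PySem.List.mem_pyRange_one.mpr ⟨by omega, by omega⟩, ?_⟩
  have hidx : pvIdx l tam ((l.length : Int) - tam) = [] := by
    unfold pvIdx
    rw [PySem.List.slice_toNat _ (by omega) (by omega)]
    rw [List.drop_eq_nil_of_le (by omega)]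
    simp
  unfold pvCondA
  rw [hidx]
  exact ⟨by simp, Or.inl (by decide)⟩

def pvStepB (tam : Int) (st : Bool × Int × Int × Option Int) (c : Char) : Bool × Int × Int × Option Int :=
  let d := pvHexFind c
  if d < 0 then (st.1, 0, 0, none)
  else
    let asc' := match st.2.2.2 with
      | some p => if d == p + 1 then st.2.1 + 1 else 1
      | none => 1
    let desc' := match st.2.2.2 with
      | some p => if d == p - 1 then st.2.2.1 + 1 else 1
      | none => 1
    (st.1 || (asc' ≥ tam || desc' ≥ tam), asc', desc', some d)

theorem pvFold_found (tam : Int) (r : List Char) : ∀ (a d : Int) (p : Option Int),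
    (r.foldl (pvStepB tam) (true, a, d, p)).1 = true := by
  induction r with
  | nil => intro a d p; rfl
  | cons c r ih =>
    intro a d p
    by_cases h : pvHexFind c < 0
    · simp only [List.foldl_cons, pvStepB, if_pos h]
      exact ih 0 0 none
    · simp only [List.foldl_cons, pvStepB, if_neg h, Bool.true_or]
      exact ih _ _ _

theorem pvLoopB_eq_fold (tam : Int) (r : List Char) : ∀ (a d : Int) (p : Option Int),
    pvLoopB tam r a d p = (r.foldl (pvStepB tam) (false, a, d, p)).1 := by
  induction r with
  | nil => intro a d p; rfl
  | cons c r ih =>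
    intro a d p
    by_cases h : pvHexFind c < 0
    · simp only [pvLoopB, List.foldl_cons, pvStepB, if_pos h]
      exact ih 0 0 none
    · simp only [pvLoopB, List.foldl_cons, pvStepB, if_neg h, Bool.false_or]
      by_cases hge : ((match p with
            | some q => if pvHexFind c == q + 1 then a + 1 else 1
            | none => 1) ≥ tam || ((match p with
            | some q => if pvHexFind c == q - 1 then d + 1 else 1
            | none => 1) ≥ tam)) = true
      · rw [if_pos hge, hge]
        exact (pvFold_found tam r _ _ _).symm
      · rw [if_neg hge, eq_false_of_ne_true hge]
        exact ih _ _ _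

def pvLastHex (l : List Char) : Option Int :=
  match l.getLast? with
  | none => none
  | some x => if pvHexFind x < 0 then none else some (pvHexFind x)

def pvInvB (tam : Int) (l : List Char) (st : Bool × Int × Int × Option Int) : Prop :=
  (st.1 = true ↔ pvSpecRun tam.toNat l) ∧
  (∀ k : Nat, (k : Int) ≤ st.2.1 ↔ ∃ w, w <:+ l ∧ w.length = k ∧ pvChW 1 w = true) ∧
  (∀ k : Nat, (k : Int) ≤ st.2.2.1 ↔ ∃ w, w <:+ l ∧ w.length = k ∧ pvChW (-1) w = true) ∧
  st.2.2.2 = pvLastHex l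

theorem pvInvB_nil (tam : Int) (ht : 1 ≤ tam) : pvInvB tam [] (false, 0, 0, none) := by
  refine ⟨?_, ?_, ?_, rfl⟩
  · show false = true ↔ pvSpecRun tam.toNat []
    simp only [Bool.false_eq_true, false_iff]
    rintro ⟨w, hlen, hinf, -⟩
    rw [List.infix_nil] at hinf
    subst hinf
    simp at hlen
    omega
  · intro k
    show (k : Int) ≤ 0 ↔ _
    constructor
    · intro hk
      have hk0 : k = 0 := by omega
      subst hk0
      exact ⟨[], List.nil_suffix, rfl, rfl⟩
    · rintro ⟨w, hs, hl, -⟩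
      rw [List.suffix_nil] at hs
      subst hs
      simp at hl
      omega
  · intro k
    show (k : Int) ≤ 0 ↔ _
    constructor
    · intro hk
      have hk0 : k = 0 := by omega
      subst hk0
      exact ⟨[], List.nil_suffix, rfl, rfl⟩
    · rintro ⟨w, hs, hl, -⟩
      rw [List.suffix_nil] at hs
      subst hs
      simp at hl
      omega

theorem pvNoHexSuffix (stp : Int) (l : List Char) (c : Char) (hc : pvHexFind c < 0) :
    ∀ w, w <:+ l ++ [c] → pvChW stp w = true → w = [] := by
  intro w hs hch
  rcases List.suffix_concat_iff.mp hs with rfl | ⟨w', rfl, hw'⟩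
  · rfl
  · have := ((pvChW_snoc stp w' c).mp hch).2.1
    omega

theorem pvSuffixChain_snoc (stp : Int) (l : List Char) (c : Char) (hc : 0 ≤ pvHexFind c) (k : Nat) :
    (∃ w, w <:+ l ++ [c] ∧ w.length = k + 1 ∧ pvChW stp w = true) ↔
    (∃ w', w' <:+ l ∧ w'.length = k ∧ pvChW stp w' = true ∧
      (k = 0 ∨ ∃ x, l.getLast? = some x ∧ pvHexFind x + stp = pvHexFind c)) := by
  constructor
  · rintro ⟨w, hs, hl, hch⟩
    rcases List.suffix_concat_iff.mp hs with rfl | ⟨w', rfl, hw'⟩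
    · simp at hl
    · obtain ⟨hch', hc', hlast⟩ := (pvChW_snoc stp w' c).mp hch
      have hl' : w'.length = k := by simpa using hl
      refine ⟨w', hw', hl', hch', ?_⟩
      rcases Nat.eq_zero_or_pos k with hk | hk
      · exact Or.inl hk
      · have hne : w' ≠ [] := by
          intro h0; subst h0; simp at hl'; omega
        right
        refine ⟨w'.getLast hne, ?_, ?_⟩
        · rw [← pvSuffix_getLast? w' l hw' hne]
          exact List.getLast?_eq_getLast_of_ne_nil hne
        · exact hlast _ (List.getLast?_eq_getLast_of_ne_nil hne)
  · rintro ⟨w', hs, hl, hch, hcond⟩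
    obtain ⟨u, hu⟩ := hs
    refine ⟨w' ++ [c], ⟨u, by rw [← List.append_assoc, hu]⟩, by simp [hl], ?_⟩
    refine (pvChW_snoc stp w' c).mpr ⟨hch, hc, ?_⟩
    intro x hx
    have hne : w' ≠ [] := by intro h0; subst h0; simp at hx
    rcases hcond with hk0 | ⟨y, hy, hstep⟩
    · subst hk0
      exact absurd (List.length_eq_zero_iff.mp hl) hne
    · rw [pvSuffix_getLast? w' l ⟨u, hu⟩ hne, hy] at hx
      cases hx
      exact hstep

theorem pvRun_ext (stp : Int) (l : List Char) (c : Char) (hc : ¬ pvHexFind c < 0)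
    (a a' : Int)
    (h2 : ∀ k : Nat, (k : Int) ≤ a ↔ ∃ w, w <:+ l ∧ w.length = k ∧ pvChW stp w = true)
    (ha' : a' = match pvLastHex l with
      | some p => if pvHexFind c = p + stp then a + 1 else 1
      | none => 1) :
    ∀ k : Nat, (k : Int) ≤ a' ↔ ∃ w, w <:+ l ++ [c] ∧ w.length = k ∧ pvChW stp w = true := by
  have hc0 : 0 ≤ pvHexFind c := by omega
  have ha0 : 0 ≤ a := (h2 0).mpr ⟨[], List.nil_suffix, rfl, rfl⟩
  have ha1 : 1 ≤ a' := by
    rcases h : pvLastHex l with _ | p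
    · rw [ha', h]
    · rw [ha', h]
      show (1 : Int) ≤ if pvHexFind c = p + stp then a + 1 else 1
      by_cases hq : pvHexFind c = p + stp
      · rw [if_pos hq]; omega
      · rw [if_neg hq]
  intro k
  match k with
  | 0 => exact iff_of_true (by omega) ⟨[], List.nil_suffix, rfl, rfl⟩
  | k + 1 =>
    rw [pvSuffixChain_snoc stp l c hc0 k]
    rcases hlh : pvLastHex l with _ | p
    · -- l is empty or does not end with a hex digit: the new run has length 1
      have ha'1 : a' = 1 := by rw [ha', hlh]
      constructor
      · intro hk
        have hk0 : k = 0 := by push_cast at hk; omega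
        subst hk0
        exact ⟨[], List.nil_suffix, rfl, rfl, Or.inl rfl⟩
      · rintro ⟨w', hs, hl, hch, hk0 | ⟨x, hx, -⟩⟩
        · subst hk0; push_cast; omega
        · rcases Nat.eq_zero_or_pos k with hk0 | hkpos
          · subst hk0; push_cast; omega
          · exfalso
            have hne : w' ≠ [] := by intro h0; subst h0; simp at hl; omega
            have hgl : w'.getLast? = some x := by
              rw [pvSuffix_getLast? w' l hs hne, hx]
            have hhex := pvChW_elem_hex stp w' hch x (List.mem_of_getLast? hgl)
            simp only [pvLastHex, hx] at hlh
            rw [if_neg (by omega)] at hlh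
            cases hlh
    · -- l ends with a hex digit of value p
      have hx : ∃ x, l.getLast? = some x ∧ pvHexFind x = p := by
        rcases hgl : l.getLast? with _ | x
        · simp only [pvLastHex, hgl] at hlh; cases hlh
        · simp only [pvLastHex, hgl] at hlh
          by_cases hxneg : pvHexFind x < 0
          · rw [if_pos hxneg] at hlh; cases hlh
          · rw [if_neg hxneg] at hlh
            injection hlh with hlh2
            exact ⟨x, rfl, hlh2⟩
      obtain ⟨x, hgl, hxp⟩ := hx
      by_cases hcnd : pvHexFind c = p + stp
      · -- the new char extends the run ending at x
        have ha'2 : a' = a + 1 := by rw [ha', hlh]; simp [hcnd]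
        constructor
        · intro hk
          obtain ⟨w', hs, hl, hch⟩ := (h2 k).mp (by push_cast at hk ⊢; omega)
          exact ⟨w', hs, hl, hch, Or.inr ⟨x, hgl, by omega⟩⟩
        · rintro ⟨w', hs, hl, hch, -⟩
          have := (h2 k).mpr ⟨w', hs, hl, hch⟩
          push_cast
          omega
      · -- the new char starts a fresh run of length 1
        have ha'2 : a' = 1 := by rw [ha', hlh]; simp [hcnd]
        constructor
        · intro hk
          have hk0 : k = 0 := by push_cast at hk; omega
          subst hk0
          exact ⟨[], List.nil_suffix, rfl, rfl, Or.inl rfl⟩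
        · rintro ⟨w', hs, hl, hch, hk0 | ⟨y, hy, hstep⟩⟩
          · subst hk0; push_cast; omega
          · rw [hgl] at hy
            injection hy with hy
            subst hy
            omega

theorem pvInvB_step (tam : Int) (ht : 1 ≤ tam) (l : List Char) (st : Bool × Int × Int × Option Int)
    (h : pvInvB tam l st) (c : Char) : pvInvB tam (l ++ [c]) (pvStepB tam st c) := by
  obtain ⟨b, a, dd, p⟩ := st
  obtain ⟨h1, h2, h3, h4⟩ := h
  simp only at h1 h2 h3 h4
  subst h4
  by_cases hc : pvHexFind c < 0
  · simp only [pvStepB, if_pos hc]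
    refine ⟨?_, ?_, ?_, ?_⟩
    · show b = true ↔ pvSpecRun tam.toNat (l ++ [c])
      rw [pvSpecRun_snoc, h1]
      have hno : ¬ ∃ w, w <:+ l ++ [c] ∧ w.length = tam.toNat ∧
          (pvChW 1 w = true ∨ pvChW (-1) w = true) := by
        rintro ⟨w, hs, hl, hch | hch⟩ <;>
          [have h0 := pvNoHexSuffix 1 l c hc w hs hch;
           have h0 := pvNoHexSuffix (-1) l c hc w hs hch] <;>
          (subst h0; simp at hl; omega)
      exact (or_iff_left hno).symm
    · intro k
      show (k : Int) ≤ 0 ↔ _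
      constructor
      · intro hk
        have hk0 : k = 0 := by omega
        subst hk0
        exact ⟨[], List.nil_suffix, rfl, rfl⟩
      · rintro ⟨w, hs, hl, hch⟩
        have h0 := pvNoHexSuffix 1 l c hc w hs hch
        subst h0
        simp at hl
        omega
    · intro k
      show (k : Int) ≤ 0 ↔ _
      constructor
      · intro hk
        have hk0 : k = 0 := by omega
        subst hk0
        exact ⟨[], List.nil_suffix, rfl, rfl⟩
      · rintro ⟨w, hs, hl, hch⟩
        have h0 := pvNoHexSuffix (-1) l c hc w hs hch
        subst h0
        simp at hl
        omega
    · show (none : Option Int) = pvLastHex (l ++ [c])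
      simp [pvLastHex, if_pos hc]
  · simp only [pvStepB, if_neg hc, beq_iff_eq]
    have hKA := pvRun_ext 1 l c hc a
      (match pvLastHex l with
        | some q => if pvHexFind c = q + 1 then a + 1 else 1
        | none => 1) h2 rfl
    have hKD := pvRun_ext (-1) l c hc dd
      (match pvLastHex l with
        | some q => if pvHexFind c = q - 1 then dd + 1 else 1
        | none => 1) h3 ?_
    case neg.refine_1 =>
      rcases pvLastHex l with _ | q
      · rfl
      · show (if pvHexFind c = q - 1 then dd + 1 else 1) = (if pvHexFind c = q + (-1) then dd + 1 else 1)
        rw [show q + (-1) = q - 1 by ring]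
    refine ⟨?_, hKA, hKD, ?_⟩
    · show (b || (_ ≥ tam || _ ≥ tam)) = true ↔ pvSpecRun tam.toNat (l ++ [c])
      rw [pvSpecRun_snoc]
      simp only [Bool.or_eq_true, decide_eq_true_eq, ge_iff_le, h1]
      have hcast : ((tam.toNat : Nat) : Int) = tam := Int.toNat_of_nonneg (by omega)
      constructor
      · rintro (hb | hup | hdn)
        · exact Or.inl hb
        · obtain ⟨w, hs, hl, hch⟩ := (hKA tam.toNat).mp (by omega)
          exact Or.inr ⟨w, hs, hl, Or.inl hch⟩
        · obtain ⟨w, hs, hl, hch⟩ := (hKD tam.toNat).mp (by omega)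
          exact Or.inr ⟨w, hs, hl, Or.inr hch⟩
      · rintro (hb | ⟨w, hs, hl, hch | hch⟩)
        · exact Or.inl hb
        · refine Or.inr (Or.inl ?_)
          have := (hKA tam.toNat).mpr ⟨w, hs, hl, hch⟩
          omega
        · refine Or.inr (Or.inr ?_)
          have := (hKD tam.toNat).mpr ⟨w, hs, hl, hch⟩
          omega
    · show some (pvHexFind c) = pvLastHex (l ++ [c])
      simp [pvLastHex, if_neg hc]

theorem pvInvB_all (tam : Int) (ht : 1 ≤ tam) (l : List Char) :
    pvInvB tam l (l.foldl (pvStepB tam) (false, 0, 0, none)) := by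
  induction l using List.reverseRecOn with
  | nil => exact pvInvB_nil tam ht
  | append_singleton l c ih =>
    rw [List.foldl_append]
    exact pvInvB_step tam ht l _ ih c

theorem pvB_iff (l : List Char) (tam : Int) (ht : 1 ≤ tam) :
    pvLoopB tam l 0 0 none = true ↔ pvSpecRun tam.toNat l := by
  rw [pvLoopB_eq_fold]
  exact (pvInvB_all tam ht l).1

-- ===== VERDICT (by name: the statement is the Claim_ definition above) =====
theorem tem_sequencia_linear_spec : Claim_equal_tem_sequencia_linear := by
  intro s tam _
  unfold Spec_tem_sequencia_linear tem_sequencia_linear tem_sequencia_linear_alt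
  by_cases ht : tam ≤ 0
  · simp only [if_pos ht]
    exact pvA_neg s.toList tam ht
  · simp only [if_neg ht]
    have ht1 : 1 ≤ tam := by omega
    rw [Bool.eq_iff_iff, pvA_iff s.toList tam ht1, pvB_iff s.toList tam ht1]
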